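-- pv_equiv track=rewrite | github.com/JamieBregman/Computational_Genomics | Sequence_Divergence_Sim.py | split_genome
-- ===== SOURCE A (Python) =====
-- def split_genome(genome):
--     result = []
--     i = 0
--     while i < len(genome):
--         letter = genome[i]
--         i += 1
--
--         number = ""
--         while i < len(genome) and (genome[i].isdigit() or genome[i] == "."):
--             number += genome[i]
--             i += 1
--         result.append([letter, number])
--     return result
-- ===== SOURCE B (Python) =====
-- def split_genome(genome):
--     result = []
--     for ch in genome:
--         if result and (ch.isdigit() or ch == "."):
--             result[-1][1] += ch
--         else:
--             result.append([ch, ""])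
--     return result
-- ===== Notes on version B (the rewrite author's own statement) =====
-- stated objective: simpler
-- what changed: Replaced the index-based outer/inner while loops with a single for-each pass that appends digit/dot characters to the current last pair, using the result's tail as the running state instead of an explicit index.
import Mathlib
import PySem

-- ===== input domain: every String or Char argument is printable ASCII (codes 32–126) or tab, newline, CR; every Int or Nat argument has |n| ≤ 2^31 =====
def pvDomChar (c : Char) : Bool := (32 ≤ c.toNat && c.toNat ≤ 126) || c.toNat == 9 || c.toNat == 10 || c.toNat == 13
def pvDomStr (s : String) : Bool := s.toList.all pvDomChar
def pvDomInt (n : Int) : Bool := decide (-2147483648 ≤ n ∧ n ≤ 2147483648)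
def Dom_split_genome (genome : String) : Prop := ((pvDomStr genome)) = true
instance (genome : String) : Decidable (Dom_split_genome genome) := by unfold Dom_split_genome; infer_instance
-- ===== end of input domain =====

-- B replaces A's index-based nested while loops by a single for-each pass that grows the
-- last pair in place; objective: simpler. Same return value on every input (proved total equivalence).

-- the shared character test: genome[i].isdigit() or genome[i] == "."
def pvP (c : Char) : Bool := PySem.Chars.isdigit c || c == '.'

-- ===== PORT A =====
-- inner while: collect digit/dot characters into `number`, return it with the rest
def pvInnerA : List Char → List Char → List Char × List Char
  | num, [] => (num, [])
  | num, c :: rest => if pvP c then pvInnerA (num ++ [c]) rest else (num, c :: rest)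

theorem pvInnerA_len : ∀ (cs num : List Char), (pvInnerA num cs).2.length ≤ cs.length := by
  intro cs
  induction cs with
  | nil => intro num; simp [pvInnerA]
  | cons c rest ih =>
    intro num
    by_cases h : pvP c = true
    · simpa [pvInnerA, h] using Nat.le_succ_of_le (ih (num ++ [c]))
    · simp [pvInnerA, h]

-- outer while: take a letter, run the inner while, append the pair
def pvGoA : List Char → List (List String)
  | [] => []
  | c :: cs =>
    [String.mk [c], String.mk (pvInnerA [] cs).1] :: pvGoA (pvInnerA [] cs).2
termination_by cs => cs.length
decreasing_by
  exact Nat.lt_succ_of_le (pvInnerA_len cs [])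

def split_genome (genome : String) : List (List String) := pvGoA genome.toList

-- ===== PORT B =====
-- result[-1][1] += ch  (the pair is always [letter, number])
def pvPushLast : List (List String) → Char → List (List String)
  | [], _ => []
  | [[a, b]], c => [[a, b.push c]]
  | p :: ps, c => p :: pvPushLast ps c

def pvStepB (acc : List (List String)) (c : Char) : List (List String) :=
  if acc ≠ [] ∧ pvP c = true then pvPushLast acc c
  else acc ++ [[String.mk [c], ""]]

def split_genome_alt (genome : String) : List (List String) :=
  genome.toList.foldl pvStepB []

-- ===== PRECONDITION & SPEC =====
def Spec_split_genome (genome : String) (out : List (List String)) : Prop := out = split_genome_alt genome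
instance (genome : String) (out : List (List String)) : Decidable (Spec_split_genome genome out) := by unfold Spec_split_genome; infer_instance

-- ===== CLAIM (what is proved, stated in full; the proofs are below) =====
def Claim_equal_split_genome : Prop := ∀ (genome : String), Dom_split_genome genome → Spec_split_genome genome (split_genome genome)

-- ===== LEMMAS AND PROOFS =====

theorem pvPushLast_append (xs : List (List String)) :
    ∀ (ys : List (List String)) (c : Char), ys ≠ [] →
      pvPushLast (xs ++ ys) c = xs ++ pvPushLast ys c := by
  induction xs with
  | nil => intro ys c _; rfl
  | cons p ps ih =>
    intro ys c hy
    have hne : ps ++ ys ≠ [] := by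
      intro h; exact hy (List.eq_nil_of_append_eq_nil h).2
    match hps : ps ++ ys, hne with
    | q :: qs, _ =>
      simp only [List.cons_append, hps, pvPushLast]
      rw [← hps, ih ys c hy]

theorem pvPushLast_ne_nil (ys : List (List String)) (c : Char) (hy : ys ≠ []) :
    pvPushLast ys c ≠ [] := by
  match ys, hy with
  | [[a, b]], _ => simp [pvPushLast]
  | [] :: ps, _ => cases ps <;> simp [pvPushLast]
  | [a] :: ps, _ => cases ps <;> simp [pvPushLast]
  | [a, b] :: q :: ps, _ => simp [pvPushLast]
  | (a :: b :: x :: l) :: ps, _ => cases ps <;> simp [pvPushLast]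

theorem pvFoldB_split :
    ∀ (cs : List Char) (xs ys : List (List String)), ys ≠ [] →
      List.foldl pvStepB (xs ++ ys) cs = xs ++ List.foldl pvStepB ys cs := by
  intro cs
  induction cs with
  | nil => intro xs ys _; rfl
  | cons c rest ih =>
    intro xs ys hy
    by_cases hp : pvP c = true
    · have h1 : pvStepB (xs ++ ys) c = xs ++ pvPushLast ys c := by
        simp [pvStepB, hp, hy, pvPushLast_append xs ys c hy]
      have h2 : pvStepB ys c = pvPushLast ys c := by simp [pvStepB, hp, hy]
      simp only [List.foldl_cons, h1, h2]
      exact ih xs _ (pvPushLast_ne_nil ys c hy)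
    · have h1 : pvStepB (xs ++ ys) c = xs ++ (ys ++ [[String.mk [c], ""]]) := by
        simp [pvStepB, hp]
      have h2 : pvStepB ys c = ys ++ [[String.mk [c], ""]] := by simp [pvStepB, hp]
      simp only [List.foldl_cons, h1, h2]
      exact ih xs _ (by simp)
    
theorem pvFoldB_group :
    ∀ (cs : List Char) (a : String) (num : List Char),
      List.foldl pvStepB [[a, String.mk num]] cs =
        [a, String.mk (pvInnerA num cs).1] :: pvGoA (pvInnerA num cs).2 := by
  intro cs
  induction cs with
  | nil => intro a num; simp [pvInnerA, pvGoA]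
  | cons c rest ih =>
    intro a num
    by_cases hp : pvP c = true
    · have h1 : pvStepB [[a, String.mk num]] c = [[a, String.mk (num ++ [c])]] := by
        simp [pvStepB, hp, pvPushLast, String.push, String.mk]
      simp only [List.foldl_cons, h1, ih a (num ++ [c]), pvInnerA, hp, if_pos]
    · have h1 : pvStepB [[a, String.mk num]] c =
          [[a, String.mk num]] ++ [[String.mk [c], ""]] := by
        simp [pvStepB, hp]
      have h2 : ("" : String) = String.mk [] := rfl
      simp only [List.foldl_cons, h1,
        pvFoldB_split rest [[a, String.mk num]] [[String.mk [c], ""]] (by simp)]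
      rw [h2, ih (String.mk [c]) []]
      simp [pvInnerA, hp, pvGoA]

theorem pvGoA_eq_foldB : ∀ (cs : List Char), pvGoA cs = List.foldl pvStepB [] cs := by
  intro cs
  cases cs with
  | nil => simp [pvGoA]
  | cons c rest =>
    have h0 : pvStepB [] c = [[String.mk [c], String.mk []]] := by
      simp [pvStepB]; rfl
    simp only [List.foldl_cons, h0, pvFoldB_group rest (String.mk [c]) [], pvGoA]

-- ===== VERDICT (by name: the statement is the Claim_ definition above) =====
theorem split_genome_spec : Claim_equal_split_genome := by
  intro genome _
  unfold Spec_split_genome split_genome split_genome_alt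
  exact pvGoA_eq_foldB genome.toList
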